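-- pv_equiv track=rewrite | github.com/kh1985/LIRIA | scripts/extract_playtest_save_candidates.py | format_story_reference
-- ===== SOURCE A (Python) =====
-- def format_story_reference(groups: dict[str, list[str]]) -> str:
--     initial = groups.get("Initial Story Assembly", [])
--     light_lines = [item for item in initial if "Light Story Reference Pass" in item or "selected engine" in item.lower()]
--     avoid_lines = [item for item in initial if "Avoid" in item or "避け" in item]
--     signal_lines = [item for item in initial if item not in light_lines and item not in avoid_lines]
--     result = [
--         "```markdown",
--         "## Light Story Reference Pass",
--         "",
--         "### Selection Signals",
--         format_items(signal_lines, empty="- TODO: extract concrete life / romance / ability / institution signals."),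
--         "",
--         "### Selected Reference Engines",
--         format_items(light_lines, empty="- TODO: choose 1-3 abstract reference engines without source names."),
--         "",
--         "### Avoid Direct Imitation",
--         format_items(avoid_lines, empty="- Do not carry source work names, characters, famous scenes, or dialogue into LIRIA."),
--         "```",
--     ]
--     return "\n".join(result)
--
-- def format_items(items: list[str], *, empty: str) -> str:
--     if not items:
--         return empty
--     return "\n".join(f"- {item}" for item in items)
-- ===== SOURCE B (Python) =====
-- def format_items(items: list[str], *, empty: str) -> str:
--     if not items:
--         return empty
--     return "\n".join(f"- {item}" for item in items)
--
-- def format_story_reference(groups: dict[str, list[str]]) -> str: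
--     light_lines = []
--     avoid_lines = []
--     signal_lines = []
--     for item in groups.get("Initial Story Assembly", []):
--         is_light = "Light Story Reference Pass" in item or "selected engine" in item.lower()
--         is_avoid = "Avoid" in item or "避け" in item
--         if is_light:
--             light_lines.append(item)
--         if is_avoid:
--             avoid_lines.append(item)
--         if not is_light and not is_avoid:
--             signal_lines.append(item)
--     result = [
--         "```markdown",
--         "## Light Story Reference Pass",
--         "",
--         "### Selection Signals",
--         format_items(signal_lines, empty="- TODO: extract concrete life / romance / ability / institution signals."),
--         "",
--         "### Selected Reference Engines",
--         format_items(light_lines, empty="- TODO: choose 1-3 abstract reference engines without source names."),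
--         "",
--         "### Avoid Direct Imitation",
--         format_items(avoid_lines, empty="- Do not carry source work names, characters, famous scenes, or dialogue into LIRIA."),
--         "```",
--     ]
--     return "\n".join(result)
-- ===== Notes on version B (the rewrite author's own statement) =====
-- stated objective: alternative
-- what changed: Replaced the three list comprehensions (the third one deciding membership against the two earlier result lists) by a single classification pass that evaluates each item's two predicates once and appends it to the light/avoid accumulators independently and to signals only when neither fires.
import Mathlib
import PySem

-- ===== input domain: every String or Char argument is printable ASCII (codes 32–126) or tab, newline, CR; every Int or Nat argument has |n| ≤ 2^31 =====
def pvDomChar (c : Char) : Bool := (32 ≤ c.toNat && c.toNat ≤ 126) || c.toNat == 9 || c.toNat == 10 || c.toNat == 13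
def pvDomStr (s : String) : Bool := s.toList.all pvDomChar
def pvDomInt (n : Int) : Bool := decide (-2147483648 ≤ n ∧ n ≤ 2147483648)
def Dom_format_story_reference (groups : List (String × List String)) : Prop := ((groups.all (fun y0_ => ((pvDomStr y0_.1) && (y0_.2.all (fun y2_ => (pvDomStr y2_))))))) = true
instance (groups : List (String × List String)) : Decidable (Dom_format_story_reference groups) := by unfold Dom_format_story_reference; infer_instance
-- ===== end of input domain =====

-- ===== PORT A =====
-- B replaces A's three comprehensions (quadratic membership-based third pass) by one linear classification pass; same output.

-- predicates of the comprehension conditions (shared: both Pythons test the same literals)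
def pvLight (item : String) : Bool :=
  PySem.Str.isIn "Light Story Reference Pass" item || PySem.Str.isIn "selected engine" (PySem.Str.lower item)

def pvAvoid (item : String) : Bool :=
  PySem.Str.isIn "Avoid" item || PySem.Str.isIn "避け" item

-- module helper format_items(items, *, empty) — used verbatim by both Pythons
def pvFormatItems (items : List String) (empty : String) : String :=
  if items = [] then empty
  else PySem.Str.join "\n" (items.map (fun item => "- " ++ item))

-- assembling 'result' and the final join — identical in both Pythons
def pvAssemble (signal light avoid : List String) : String :=
  PySem.Str.join "\n"
    [ "```markdown",
      "## Light Story Reference Pass",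
      "",
      "### Selection Signals",
      pvFormatItems signal "- TODO: extract concrete life / romance / ability / institution signals.",
      "",
      "### Selected Reference Engines",
      pvFormatItems light "- TODO: choose 1-3 abstract reference engines without source names.",
      "",
      "### Avoid Direct Imitation",
      pvFormatItems avoid "- Do not carry source work names, characters, famous scenes, or dialogue into LIRIA.",
      "```" ]

def format_story_reference (groups : List (String × List String)) : String :=
  let initial := (PySem.Dict.ofList groups).getD "Initial Story Assembly" []
  let light_lines := initial.filter (fun item => pvLight item)
  let avoid_lines := initial.filter (fun item => pvAvoid item)
  let signal_lines := initial.filter (fun item => !light_lines.contains item && !avoid_lines.contains item)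
  pvAssemble signal_lines light_lines avoid_lines

-- ===== PORT B =====
-- one pass: (light, avoid, signal) accumulators, each item classified once
def pvClassify (initial : List String) : List String × List String × List String :=
  initial.foldl
    (fun acc item =>
      let isLight := pvLight item
      let isAvoid := pvAvoid item
      let ls := if isLight then acc.1 ++ [item] else acc.1
      let as_ := if isAvoid then acc.2.1 ++ [item] else acc.2.1
      let ss := if !isLight && !isAvoid then acc.2.2 ++ [item] else acc.2.2
      (ls, as_, ss))
    ([], [], [])

def format_story_reference_alt (groups : List (String × List String)) : String :=
  let acc := pvClassify ((PySem.Dict.ofList groups).getD "Initial Story Assembly" [])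
  pvAssemble acc.2.2 acc.1 acc.2.1

-- ===== PRECONDITION & SPEC =====
def Spec_format_story_reference (groups : List (String × List String)) (out : String) : Prop := out = format_story_reference_alt groups
instance (groups : List (String × List String)) (out : String) : Decidable (Spec_format_story_reference groups out) := by unfold Spec_format_story_reference; infer_instance

-- ===== CLAIM (what is proved, stated in full; the proofs are below) =====
def Claim_equal_format_story_reference : Prop := ∀ (groups : List (String × List String)), Dom_format_story_reference groups → Spec_format_story_reference groups (format_story_reference groups)

-- ===== LEMMAS AND PROOFS =====

-- B's fold computes the three filters (generalized accumulator)
theorem pvClassify_go (xs : List String) (l a s : List String) :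
    xs.foldl
      (fun acc item =>
        let isLight := pvLight item
        let isAvoid := pvAvoid item
        let ls := if isLight then acc.1 ++ [item] else acc.1
        let as_ := if isAvoid then acc.2.1 ++ [item] else acc.2.1
        let ss := if !isLight && !isAvoid then acc.2.2 ++ [item] else acc.2.2
        (ls, as_, ss))
      (l, a, s)
    = (l ++ xs.filter (fun it => pvLight it),
       a ++ xs.filter (fun it => pvAvoid it),
       s ++ xs.filter (fun it => !pvLight it && !pvAvoid it)) := by
  induction xs generalizing l a s with
  | nil => simp
  | cons x xs ih =>
    simp only [List.foldl_cons, List.filter_cons, ih]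
    by_cases hL : pvLight x <;> by_cases hA : pvAvoid x <;>
      simp [hL, hA]

theorem pvClassify_eq (initial : List String) :
    pvClassify initial
    = (initial.filter (fun it => pvLight it),
       initial.filter (fun it => pvAvoid it),
       initial.filter (fun it => !pvLight it && !pvAvoid it)) := by
  unfold pvClassify
  rw [pvClassify_go]
  simp

-- membership in a filtered list of an element of the base list decides the predicate
theorem pvContains_filter (xs : List String) (p : String → Bool) (x : String) (hx : x ∈ xs) :
    (xs.filter p).contains x = p x := by
  by_cases h : p x = true
  · simp [List.mem_filter, hx, h]
  · have : x ∉ xs.filter p := by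
      intro hmem
      exact h (List.of_mem_filter hmem)
    simp [h, this]

theorem pvSignal_eq (initial : List String) :
    initial.filter (fun item =>
        !(initial.filter (fun it => pvLight it)).contains item &&
        !(initial.filter (fun it => pvAvoid it)).contains item)
    = initial.filter (fun it => !pvLight it && !pvAvoid it) := by
  apply List.filter_congr
  intro x hx
  rw [pvContains_filter _ _ _ hx, pvContains_filter _ _ _ hx]

-- ===== VERDICT (by name: the statement is the Claim_ definition above) =====
theorem format_story_reference_spec : Claim_equal_format_story_reference := by
  intro groups _
  unfold Spec_format_story_reference
  simp only [format_story_reference, format_story_reference_alt, pvClassify_eq]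
  rw [pvSignal_eq]
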